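-- pv_equiv track=rewrite | github.com/KiyanYang/TelegramBot | bot/tools/text.py | is_message_empty
-- ===== SOURCE A (Python) =====
-- def is_message_empty(text: str) -> bool:
--     """
--     判断是否为空消息(即不含任何可见字符的消息)
--
--     Parameters
--     ----------
--     text: `str`
--         消息文本
--
--     Returns
--     -------
--     `bool`
--         如果为空消息返回`True`, 否则返回`False`
--
--     """
--     # ASCII 编码中 0~32 和 127 是不可见（无法显示）, 33 是空格
--     empty_repl = list(range(33)) + [127]
--     for i in empty_repl:
--         text = text.replace(chr(i), '')
--     if text == '':
--         return True
--     else: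
--         return False
-- ===== SOURCE B (Python) =====
-- def is_message_empty(text: str) -> bool:
--     return all(ord(c) < 33 or ord(c) == 127 for c in text)
-- ===== Notes on version B (the rewrite author's own statement) =====
-- stated objective: idiomatic
-- what changed: Replaced the 34-pass replace-each-invisible-character-then-compare-to-empty loop by a single pass over the characters testing ord(c) < 33 or ord(c) == 127 with all(), with early exit.
import Mathlib
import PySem

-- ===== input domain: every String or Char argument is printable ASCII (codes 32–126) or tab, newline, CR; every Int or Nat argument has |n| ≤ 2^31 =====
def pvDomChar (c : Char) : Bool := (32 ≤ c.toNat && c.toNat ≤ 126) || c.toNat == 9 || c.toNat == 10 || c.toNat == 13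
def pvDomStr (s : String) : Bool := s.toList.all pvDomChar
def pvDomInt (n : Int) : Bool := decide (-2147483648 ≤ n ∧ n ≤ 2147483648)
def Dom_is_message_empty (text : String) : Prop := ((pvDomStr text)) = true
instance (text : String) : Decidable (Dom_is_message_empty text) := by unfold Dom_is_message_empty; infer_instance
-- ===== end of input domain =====

-- B replaces A's 34 replace-passes by one idiomatic membership scan; equivalence is exact.

-- ===== PORT A =====
def is_message_empty (text : String) : Bool :=
  let empty_repl : List Int := PySem.List.pyRange 0 33 1 ++ [127]
  let text := empty_repl.foldl
    (fun s i => PySem.Str.replace s (String.ofList [Char.ofNat i.toNat]) "") text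
  if text == "" then true else false

-- ===== PORT B =====
def is_message_empty_alt (text : String) : Bool :=
  text.toList.all (fun c => decide (c.toNat < 33) || c.toNat == 127)

-- ===== PRECONDITION & SPEC =====
def Spec_is_message_empty (text : String) (out : Bool) : Prop := out = is_message_empty_alt text
instance (text : String) (out : Bool) : Decidable (Spec_is_message_empty text out) := by unfold Spec_is_message_empty; infer_instance

-- ===== CLAIM (what is proved, stated in full; the proofs are below) =====
def Claim_equal_is_message_empty : Prop := ∀ (text : String), Dom_is_message_empty text → Spec_is_message_empty text (is_message_empty text)

-- ===== LEMMAS AND PROOFS =====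

-- replace.go with a single-char pattern and empty replacement is a filter
theorem replace_go_filter (ch : Char) : ∀ (l acc : List Char) (fuel : Nat),
    l.length ≤ fuel →
    PySem.Chars.replace.go [ch] [] fuel l acc = acc.reverse ++ l.filter (fun c => c != ch) := by
  intro l
  induction l with
  | nil =>
      intro acc fuel _
      cases fuel <;> simp [PySem.Chars.replace.go]
  | cons c t ih =>
      intro acc fuel hf
      cases fuel with
      | zero => simp at hf
      | succ n =>
          simp only [List.length_cons, Nat.succ_le_succ_iff] at hf
          rw [PySem.Chars.replace.go]
          by_cases h : ch = c
          · subst h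
            simp [List.isPrefixOf, ih _ _ hf]
          · have : List.isPrefixOf [ch] (c :: t) = false := by
              simp [List.isPrefixOf, h]
            simp only [this, if_neg Bool.false_ne_true]
            rw [ih _ _ hf]
            simp [bne, Ne.symm h]

theorem replace_single_char (s : List Char) (ch : Char) :
    PySem.Chars.replace s [ch] [] = s.filter (fun c => c != ch) := by
  rw [PySem.Chars.replace]
  simp [replace_go_filter ch s [] s.length le_rfl]

-- the fold over the code list filters out every listed character
theorem foldl_replace_filter (codes : List Int) : ∀ (s : String),
    (codes.foldl (fun s i => PySem.Str.replace s (String.ofList [Char.ofNat i.toNat]) "") s).toList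
      = s.toList.filter (fun c => codes.all (fun i => c != Char.ofNat i.toNat)) := by
  induction codes with
  | nil => simp
  | cons i rest ih =>
      intro s
      rw [List.foldl_cons, ih]
      have h1 : (PySem.Str.replace s (String.ofList [Char.ofNat i.toNat]) "").toList
          = s.toList.filter (fun c => c != Char.ofNat i.toNat) := by
        rw [PySem.Str.toList_replace]
        simp only [String.toList_ofList, String.toList_empty]
        exact replace_single_char s.toList (Char.ofNat i.toNat)
      rw [h1, List.filter_filter]
      apply List.filter_congr
      intro c _
      simp [List.all_cons, Bool.and_comm]

theorem codes_eq : PySem.List.pyRange 0 33 1 ++ [127]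
    = ((List.range 33).map (Int.ofNat ·)) ++ [127] := by decide

theorem toNat_ofNat_small (k : Nat) (h : k < 33) : (Char.ofNat k).toNat = k := by
  unfold Char.ofNat
  split
  · rfl
  · exfalso; rename_i hv; exact hv (by unfold Nat.isValidChar; omega)

-- a character survives the filter iff it is visible
theorem visible_iff (c : Char) :
    ((((List.range 33).map (Int.ofNat ·)) ++ [(127 : Int)]).all
        (fun i => c != Char.ofNat i.toNat)) = true
      ↔ ¬ (c.toNat < 33 ∨ c.toNat = 127) := by
  simp only [List.all_append, List.all_map, Bool.and_eq_true, List.all_eq_true,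
    List.mem_range, Function.comp, bne_iff_ne, ne_eq, List.all_cons, List.all_nil, Bool.and_true]
  constructor
  · rintro ⟨h1, h2⟩ (hlt | h127)
    · exact h1 c.toNat hlt (by simp)
    · exact h2 (by
        have h7 : (127 : Int).toNat = 127 := by decide
        rw [h7, ← h127, Char.ofNat_toNat])
  · intro h
    push_neg at h
    obtain ⟨h1, h2⟩ := h
    refine ⟨fun k hk heq => ?_, fun heq => ?_⟩
    · have : c.toNat = k := by rw [heq]; simp [toNat_ofNat_small k hk]
      omega
    · apply h2; rw [heq]; decide

-- ===== VERDICT (by name: the statement is the Claim_ definition above) =====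
theorem is_message_empty_spec : Claim_equal_is_message_empty := by
  intro text _
  unfold Spec_is_message_empty is_message_empty is_message_empty_alt
  simp only []
  rw [show ∀ s : String, (if s == "" then true else false) = (s == "") from fun s => by split <;> simp_all]
  rw [Bool.eq_iff_iff]
  rw [beq_iff_eq, ← String.toList_eq_nil_iff, foldl_replace_filter, codes_eq,
    List.filter_eq_nil_iff, List.all_eq_true]
  constructor
  · intro h c hc
    have hinv : c.toNat < 33 ∨ c.toNat = 127 := by
      by_contra hn
      exact h c hc ((visible_iff c).mpr hn)
    rcases hinv with h' | h' <;> simp [h']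
  · intro h c hc hall
    have hvis := (visible_iff c).mp hall
    have hb := h c hc
    simp only [Bool.or_eq_true, decide_eq_true_eq, beq_iff_eq] at hb
    rcases hb with h' | h'
    · exact hvis (Or.inl h')
    · exact hvis (Or.inr h')
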